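-- pv_equiv track=rewrite | github.com/kh277/BOJ | 백준/Gold/2504. 괄호의 값/괄호의 값.py | solve
-- ===== SOURCE A (Python) =====
-- from collections import deque
--
-- def solve(L: list, N: int) -> int:
--     stack = deque()
--     result = 0
--     temp = 1
--
--     for i in range(N):
--         br = L[i]
--
--         if br == '(':
--             temp *= 2
--             stack.append(br)
--         elif br == '[':
--             temp *= 3
--             stack.append(br)
--
--         elif br == ')':
--             # 스택이 비어있지 않거나 괄호쌍이 안맞는 경우
--             if not stack or stack[-1] == '[':
--                 return 0
--             # 이전 괄호가 '(' 였다면 res에 추가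
--             if L[i-1] == '(':
--                 result += temp
--             temp //= 2
--             stack.pop()
--
--         elif br == ']':
--             if not stack or stack[-1] == '(':
--                 return 0
--             if L[i-1] == '[':
--                 result += temp
--             temp //= 3
--             stack.pop()
--
--     if stack:
--         return 0
--
--     return result
-- ===== SOURCE B (Python) =====
-- def solve(L: list, N: int) -> int:
--     stack = []
--     for i in range(N):
--         br = L[i]
--         if br == '(' or br == '[':
--             stack.append(br)
--         elif br == ')':
--             inner = 0
--             while stack and isinstance(stack[-1], int):
--                 inner += stack.pop()
--             if not stack or stack[-1] != '(':
--                 return 0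
--             stack.pop()
--             stack.append(2 if L[i-1] == '(' else inner * 2)
--         elif br == ']':
--             inner = 0
--             while stack and isinstance(stack[-1], int):
--                 inner += stack.pop()
--             if not stack or stack[-1] != '[':
--                 return 0
--             stack.pop()
--             stack.append(3 if L[i-1] == '[' else inner * 3)
--     total = 0
--     for e in stack:
--         if not isinstance(e, int):
--             return 0
--         total += e
--     return total
-- ===== Notes on version B (the rewrite author's own statement) =====
-- stated objective: alternative
-- what changed: B replaces A's global multiplier/result accumulator (temp, result, floordiv on close) with a single stack holding markers and integer partial values: closing a bracket pops and sums the completed inner values and pushes one combined value, and the answer is the sum of the leftover stack.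
-- outside the precondition, e.g. on solve([')'], 5): A returns 0, B returns 0
import Mathlib
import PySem

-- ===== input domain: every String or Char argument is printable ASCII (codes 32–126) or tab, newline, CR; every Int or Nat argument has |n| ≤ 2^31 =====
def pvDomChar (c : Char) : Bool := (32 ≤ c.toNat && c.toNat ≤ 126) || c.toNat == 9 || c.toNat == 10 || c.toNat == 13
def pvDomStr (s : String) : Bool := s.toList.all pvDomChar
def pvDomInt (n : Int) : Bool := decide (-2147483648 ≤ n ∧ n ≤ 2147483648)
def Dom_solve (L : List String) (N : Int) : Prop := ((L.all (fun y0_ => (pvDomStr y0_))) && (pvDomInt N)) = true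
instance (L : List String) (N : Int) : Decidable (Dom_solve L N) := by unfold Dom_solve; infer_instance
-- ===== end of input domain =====

-- B keeps one stack of markers and integer partial values instead of A's temp/result accumulators; same O(n) cost.

-- ===== PORT A =====
-- loop over i in range(N); stack with head = Python's stack[-1]
def solveLoopA (L : List String) (N : Int) (i : Int) (stack : List String) (result : Int) (temp : Int) : Int :=
  if h : i < N then
    let br := PySem.List.pyGetD L i ""
    if br = "(" then solveLoopA L N (i + 1) (br :: stack) result (temp * 2)
    else if br = "[" then solveLoopA L N (i + 1) (br :: stack) result (temp * 3)
    else if br = ")" then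
      if stack = [] ∨ stack.head? = some "[" then 0
      else
        let result' := if PySem.List.pyGetD L (i - 1) "" = "(" then result + temp else result
        solveLoopA L N (i + 1) stack.tail result' (PySem.Int.floordiv temp 2)
    else if br = "]" then
      if stack = [] ∨ stack.head? = some "(" then 0
      else
        let result' := if PySem.List.pyGetD L (i - 1) "" = "[" then result + temp else result
        solveLoopA L N (i + 1) stack.tail result' (PySem.Int.floordiv temp 3)
    else solveLoopA L N (i + 1) stack result temp
  else if stack = [] then result else 0
termination_by (N - i).toNat
decreasing_by all_goals omega

def solve (L : List String) (N : Int) : Int :=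
  solveLoopA L N 0 [] 0 1

-- ===== PORT B =====
-- stack entry: Sum.inl marker string | Sum.inr partial value; head = Python's stack[-1]
-- the while loop 'pop ints into inner'
def popInts : List (String ⊕ Int) → Int × List (String ⊕ Int)
  | .inr v :: rest => let p := popInts rest; (v + p.1, p.2)
  | b => (0, b)

-- final 'for e in stack' pass (bottom to top), called on stack.reverse
def finishB (acc : Int) : List (String ⊕ Int) → Int
  | [] => acc
  | .inl _ :: _ => 0
  | .inr v :: rest => finishB (acc + v) rest

def solveLoopB (L : List String) (N : Int) (i : Int) (stack : List (String ⊕ Int)) : Int :=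
  if h : i < N then
    let br := PySem.List.pyGetD L i ""
    if br = "(" ∨ br = "[" then solveLoopB L N (i + 1) (.inl br :: stack)
    else if br = ")" then
      let p := popInts stack
      if p.2.head? = some (Sum.inl "(") then
        solveLoopB L N (i + 1) (.inr (if PySem.List.pyGetD L (i - 1) "" = "(" then 2 else p.1 * 2) :: p.2.tail)
      else 0
    else if br = "]" then
      let p := popInts stack
      if p.2.head? = some (Sum.inl "[") then
        solveLoopB L N (i + 1) (.inr (if PySem.List.pyGetD L (i - 1) "" = "[" then 3 else p.1 * 3) :: p.2.tail)
      else 0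
    else solveLoopB L N (i + 1) stack
  else finishB 0 stack.reverse
termination_by (N - i).toNat
decreasing_by all_goals omega

def solve_alt (L : List String) (N : Int) : Int :=
  solveLoopB L N 0 []

-- ===== PRECONDITION & SPEC =====
-- Pre_ excludes N > len(L), where A's L[i] raises IndexError for some i in range(N); on such inputs
-- A may still return 0 when a bracket mismatch aborts the loop before the bad index, and B does the same.
def Pre_solve (L : List String) (N : Int) : Prop := N ≤ (L.length : Int)
instance (L : List String) (N : Int) : Decidable (Pre_solve L N) := by unfold Pre_solve; infer_instance

def pvWitness_solve : List String × Int := (["(", "[", "]", ")"], 4)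

def Spec_solve (L : List String) (N : Int) (out : Int) : Prop := out = solve_alt L N
instance (L : List String) (N : Int) (out : Int) : Decidable (Spec_solve L N out) := by unfold Spec_solve; infer_instance

-- ===== CLAIM (what is proved, stated in full; the proofs are below) =====
def Claim_equal_solve : Prop := ∀ (L : List String) (N : Int), Dom_solve L N → Pre_solve L N → Spec_solve L N (solve L N)

-- ===== LEMMAS AND PROOFS =====

-- marker strings of B's stack, top first (= A's stack)
def markersOf : List (String ⊕ Int) → List String
  | [] => []
  | .inl m :: r => m :: markersOf r
  | .inr _ :: r => markersOf r

def mult (m : String) : Int := if m = "(" then 2 else 3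

-- product of multipliers of the markers (= A's temp)
def pmul : List (String ⊕ Int) → Int
  | [] => 1
  | .inl m :: r => mult m * pmul r
  | .inr _ :: r => pmul r

-- weighted value of the stack (= A's result)
def gval : List (String ⊕ Int) → Int
  | [] => 0
  | .inl _ :: r => gval r
  | .inr v :: r => v * pmul r + gval r

-- plain sum of the integer entries
def sInt : List (String ⊕ Int) → Int
  | [] => 0
  | .inl _ :: r => sInt r
  | .inr v :: r => v + sInt r

lemma markersOf_nil_iff (b : List (String ⊕ Int)) :
    markersOf b = [] ↔ ∀ e ∈ b, ∃ v, e = Sum.inr v := by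
  induction b with
  | nil => simp [markersOf]
  | cons e r ih =>
    cases e with
    | inl m => simp [markersOf]
    | inr v => simp [markersOf, ih]

lemma pmul_of_no_mark (b : List (String ⊕ Int)) (h : markersOf b = []) : pmul b = 1 := by
  induction b with
  | nil => rfl
  | cons e r ih =>
    cases e with
    | inl m => simp [markersOf] at h
    | inr v => simp [markersOf] at h; simp [pmul, ih h]

lemma gval_of_no_mark (b : List (String ⊕ Int)) (h : markersOf b = []) : gval b = sInt b := by
  induction b with
  | nil => rfl
  | cons e r ih =>
    cases e with
    | inl m => simp [markersOf] at h
    | inr v =>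
      simp [markersOf] at h
      simp [gval, sInt, ih h, pmul_of_no_mark r h]

lemma markersOf_reverse_nil (b : List (String ⊕ Int)) (h : markersOf b = []) :
    markersOf b.reverse = [] := by
  rw [markersOf_nil_iff] at h ⊢
  intro e he
  exact h e (List.mem_reverse.mp he)

lemma sInt_append (l1 l2 : List (String ⊕ Int)) : sInt (l1 ++ l2) = sInt l1 + sInt l2 := by
  induction l1 with
  | nil => simp [sInt]
  | cons e r ih => cases e <;> simp [sInt, ih] <;> ring

lemma sInt_reverse (b : List (String ⊕ Int)) : sInt b.reverse = sInt b := by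
  induction b with
  | nil => rfl
  | cons e r ih =>
    rw [List.reverse_cons, sInt_append, ih]
    cases e <;> simp [sInt] <;> ring

lemma finishB_no_mark (b : List (String ⊕ Int)) (h : markersOf b = []) :
    ∀ acc, finishB acc b = acc + sInt b := by
  induction b with
  | nil => intro acc; simp [finishB, sInt]
  | cons e r ih =>
    cases e with
    | inl m => simp [markersOf] at h
    | inr v =>
      intro acc
      simp [markersOf] at h
      simp [finishB, sInt, ih h, add_assoc]

lemma finishB_mark (b : List (String ⊕ Int)) (h : markersOf b ≠ []) :
    ∀ acc, finishB acc b = 0 := by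
  induction b with
  | nil => simp [markersOf] at h
  | cons e r ih =>
    cases e with
    | inl m => intro acc; simp [finishB]
    | inr v =>
      intro acc
      simp [markersOf] at h
      exact ih h _

lemma markersOf_reverse_mark (b : List (String ⊕ Int)) (h : markersOf b ≠ []) :
    markersOf b.reverse ≠ [] := by
  intro hc
  apply h
  have := markersOf_reverse_nil _ hc
  simpa using this

lemma popInts_spec (b : List (String ⊕ Int)) (m : String) (st' : List String)
    (h : markersOf b = m :: st') :
    (popInts b).2 = Sum.inl m :: (popInts b).2.tail ∧
    markersOf (popInts b).2.tail = st' ∧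
    pmul b = mult m * pmul (popInts b).2.tail ∧
    gval b = (popInts b).1 * (mult m * pmul (popInts b).2.tail) + gval (popInts b).2.tail := by
  induction b with
  | nil => simp [markersOf] at h
  | cons e r ih =>
    cases e with
    | inl m' =>
      simp [markersOf] at h
      obtain ⟨h1, h2⟩ := h
      subst h1
      refine ⟨rfl, by simpa [popInts, markersOf], by simp [popInts, pmul], ?_⟩
      simp [popInts, gval]
    | inr v =>
      simp [markersOf] at h
      obtain ⟨h1, h2, h3, h4⟩ := ih h
      refine ⟨?_, ?_, ?_, ?_⟩
      · simpa [popInts] using h1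
      · simpa [popInts] using h2
      · simpa [popInts, pmul] using h3
      · simp only [popInts, gval]
        rw [h4, h3]
        ring

lemma popInts_all_int (b : List (String ⊕ Int)) (h : ∀ e ∈ b, ∃ v, e = Sum.inr v) :
    (popInts b).2 = [] := by
  induction b with
  | nil => simp [popInts]
  | cons e r ih =>
    obtain ⟨v, hv⟩ := h e (by simp)
    subst hv
    simp only [popInts]
    exact ih (fun x hx => h x (by simp [hx]))

lemma main_loop (L : List String) :
    ∀ (n : Nat) (a : Int) (b : Int) (bstk : List (String ⊕ Int)),
      (b - a).toNat = n →
      (∀ i : Int, a ≤ i → i < b → 0 ≤ i ∧ i < (L.length : Int)) →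
      (∀ m ∈ markersOf bstk, m = "(" ∨ m = "[") →
      (markersOf bstk ≠ [] →
        (PySem.List.pyGetD L (a - 1) "" = "(" → bstk.head? = some (Sum.inl "(")) ∧
        (PySem.List.pyGetD L (a - 1) "" = "[" → bstk.head? = some (Sum.inl "["))) →
      solveLoopA L b a (markersOf bstk) (gval bstk) (pmul bstk)
        = solveLoopB L b a bstk := by
  intro n
  induction n with
  | zero =>
    intro a b bstk hn _ _ _
    have hnb : ¬ a < b := by omega
    rw [solveLoopA, solveLoopB, dif_neg hnb, dif_neg hnb]
    by_cases hm : markersOf bstk = []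
    · simp [hm, finishB_no_mark _ (markersOf_reverse_nil _ hm), sInt_reverse,
        gval_of_no_mark _ hm]
    · simp [hm, finishB_mark _ (markersOf_reverse_mark _ hm)]
  | succ n ih =>
    intro a b bstk hn hrange hmk hprev
    have hab : a < b := by omega
    rw [solveLoopA, solveLoopB, dif_pos hab, dif_pos hab]
    have haL : 0 ≤ a ∧ a < (L.length : Int) := hrange a le_rfl hab
    have hmemnext : ∀ i : Int, a + 1 ≤ i → i < b → 0 ≤ i ∧ i < (L.length : Int) := by
      intro i h1 h2
      exact hrange i (by omega) h2
    have hcur : PySem.List.pyGetD L ((a + 1) - 1) "" = PySem.List.pyGetD L a "" := by ring_nf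
    set br := PySem.List.pyGetD L a "" with hbr
    by_cases h1 : br = "("
    · -- push '('
      rw [if_pos h1, if_pos (Or.inl h1)]
      have := ih (a+1) b (Sum.inl "(" :: bstk) (by omega) hmemnext
        (by intro m hm; simp [markersOf] at hm
            rcases hm with h | h
            · exact Or.inl h
            · exact hmk m h)
        (by intro _
            constructor
            · intro _; rfl
            · intro hx; rw [hcur, h1] at hx; simp at hx)
      rw [h1]
      simpa [markersOf, pmul, gval, mult, mul_comm] using this
    · by_cases h2 : br = "["
      · rw [if_neg h1, if_pos h2, if_pos (Or.inr h2)]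
        have := ih (a+1) b (Sum.inl "[" :: bstk) (by omega) hmemnext
          (by intro m hm; simp [markersOf] at hm
              rcases hm with h | h
              · exact Or.inr h
              · exact hmk m h)
          (by intro _
              constructor
              · intro hx; rw [hcur, h2] at hx; simp at hx
              · intro _; rfl)
        rw [h2]
        simpa [markersOf, pmul, gval, mult, mul_comm] using this
      · by_cases h3 : br = ")"
        · -- close paren
          rw [if_neg h1, if_neg h2, if_pos h3,
              if_neg (show ¬(br = "(" ∨ br = "[") from by simp [h1, h2]), if_pos h3]
          rcases hms : markersOf bstk with _ | ⟨m, st'⟩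
          · -- empty stack: both 0
            have hpe : (popInts bstk).2 = [] :=
              popInts_all_int _ ((markersOf_nil_iff bstk).mp hms)
            rw [if_pos (Or.inl rfl), if_neg (show ¬((popInts bstk).2.head? = some (Sum.inl "(")) from by rw [hpe]; simp)]
          · -- nonempty: top marker m
            obtain ⟨hp1, hp2, hp3, hp4⟩ := popInts_spec bstk m st' hms
            have hm12 : m = "(" ∨ m = "[" := hmk m (by rw [hms]; simp)
            rcases hm12 with hm | hm
            · -- matching '(' : proceed
              subst hm
              rw [if_neg (show ¬(("(" :: st' : List String) = [] ∨ ("(" :: st').head? = some "[") from by simp),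
                  if_pos (show (popInts bstk).2.head? = some (Sum.inl "(") from by rw [hp1]; rfl)]
              simp only [List.tail_cons]
              set prev := PySem.List.pyGetD L (a - 1) "" with hprevdef
              have hrec := ih (a+1) b
                (Sum.inr (if prev = "(" then 2 else (popInts bstk).1 * 2) :: (popInts bstk).2.tail)
                (by omega) hmemnext
                (by intro x hx; simp [markersOf, hp2] at hx
                    apply hmk; rw [hms]; simp [hx])
                (by intro _
                    constructor
                    · intro hx; rw [hcur, h3] at hx; simp at hx
                    · intro hx; rw [hcur, h3] at hx; simp at hx)
              have hgnew : gval (Sum.inr (if prev = "(" then 2 else (popInts bstk).1 * 2) :: (popInts bstk).2.tail)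
                  = (if prev = "(" then gval bstk + pmul bstk else gval bstk) := by
                by_cases hpv : prev = "("
                · -- empty pair: previous char pushed the top marker, so no ints were popped
                  have hhead : bstk.head? = some (Sum.inl "(") :=
                    (hprev (by rw [hms]; simp)).1 hpv
                  rcases bstk with _ | ⟨e, r⟩
                  · simp at hhead
                  · simp at hhead
                    subst hhead
                    have hpop : popInts (Sum.inl "(" :: r) = (0, Sum.inl "(" :: r) := by
                      simp [popInts]
                    simp [hpv, gval, hpop] at hp3 ⊢
                    rw [hp3]
                    simp [gval, mult]
                    ring
                · simp only [hpv, if_false]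
                  rw [hp4, gval]
                  have hm2 : mult "(" = 2 := by simp [mult]
                  rw [hm2] at hp4 ⊢
                  ring
              have hpnew : pmul (Sum.inr (if prev = "(" then 2 else (popInts bstk).1 * 2) :: (popInts bstk).2.tail)
                  = PySem.Int.floordiv (pmul bstk) 2 := by
                rw [pmul, hp3]
                have hm2 : mult "(" = 2 := by simp [mult]
                rw [hm2, mul_comm]
                rw [PySem.Int.floordiv_eq_ediv_of_pos (by omega)]
                simp
              simp only [markersOf] at hrec
              rw [hgnew, hpnew, hp2] at hrec
              exact hrec
            · -- top is '[': A returns 0; B sees popInts top ≠ inl "(" so 0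
              subst hm
              rw [if_pos (Or.inr List.head?_cons),
                  if_neg (show ¬((popInts bstk).2.head? = some (Sum.inl "(")) from by rw [hp1]; simp)]
        · by_cases h4 : br = "]"
          · rw [if_neg h1, if_neg h2, if_neg h3, if_pos h4,
                if_neg (show ¬(br = "(" ∨ br = "[") from by simp [h1, h2]), if_neg h3, if_pos h4]
            rcases hms : markersOf bstk with _ | ⟨m, st'⟩
            · have hpe : (popInts bstk).2 = [] :=
                popInts_all_int _ ((markersOf_nil_iff bstk).mp hms)
              rw [if_pos (Or.inl rfl), if_neg (show ¬((popInts bstk).2.head? = some (Sum.inl "[")) from by rw [hpe]; simp)]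
            · obtain ⟨hp1, hp2, hp3, hp4⟩ := popInts_spec bstk m st' hms
              have hm12 : m = "(" ∨ m = "[" := hmk m (by rw [hms]; simp)
              rcases hm12 with hm | hm
              · subst hm
                rw [if_pos (Or.inr List.head?_cons),
                    if_neg (show ¬((popInts bstk).2.head? = some (Sum.inl "[")) from by rw [hp1]; simp)]
              · subst hm
                rw [if_neg (show ¬(("[" :: st' : List String) = [] ∨ ("[" :: st').head? = some "(") from by simp),
                    if_pos (show (popInts bstk).2.head? = some (Sum.inl "[") from by rw [hp1]; rfl)]
                simp only [List.tail_cons]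
                set prev := PySem.List.pyGetD L (a - 1) "" with hprevdef
                have hrec := ih (a+1) b
                  (Sum.inr (if prev = "[" then 3 else (popInts bstk).1 * 3) :: (popInts bstk).2.tail)
                  (by omega) hmemnext
                  (by intro x hx; simp [markersOf, hp2] at hx
                      apply hmk; rw [hms]; simp [hx])
                  (by intro _
                      constructor
                      · intro hx; rw [hcur, h4] at hx; simp at hx
                      · intro hx; rw [hcur, h4] at hx; simp at hx)
                have hgnew : gval (Sum.inr (if prev = "[" then 3 else (popInts bstk).1 * 3) :: (popInts bstk).2.tail)
                    = (if prev = "[" then gval bstk + pmul bstk else gval bstk) := by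
                  by_cases hpv : prev = "["
                  · have hhead : bstk.head? = some (Sum.inl "[") :=
                      (hprev (by rw [hms]; simp)).2 hpv
                    rcases bstk with _ | ⟨e, r⟩
                    · simp at hhead
                    · simp at hhead
                      subst hhead
                      have hpop : popInts (Sum.inl "[" :: r) = (0, Sum.inl "[" :: r) := by
                        simp [popInts]
                      simp [hpv, gval, hpop] at hp3 ⊢
                      rw [hp3]
                      simp [mult]
                      ring
                  · simp only [hpv, if_false]
                    rw [hp4, gval]
                    have hm3 : mult "[" = 3 := by simp [mult]
                    rw [hm3] at hp4 ⊢
                    ring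
                have hpnew : pmul (Sum.inr (if prev = "[" then 3 else (popInts bstk).1 * 3) :: (popInts bstk).2.tail)
                    = PySem.Int.floordiv (pmul bstk) 3 := by
                  rw [pmul, hp3]
                  have hm3 : mult "[" = 3 := by simp [mult]
                  rw [hm3, mul_comm]
                  rw [PySem.Int.floordiv_eq_ediv_of_pos (by omega)]
                  simp
                simp only [markersOf] at hrec
                rw [hgnew, hpnew, hp2] at hrec
                exact hrec
          · -- other character: skip
            rw [if_neg h1, if_neg h2, if_neg h3, if_neg h4, if_neg (show ¬(br = "(" ∨ br = "[") from by simp [h1, h2]), if_neg h3, if_neg h4]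
            exact ih (a+1) b bstk (by omega) hmemnext hmk
              (by intro _
                  constructor
                  · intro hx; rw [hcur] at hx; exact absurd hx h1
                  · intro hx; rw [hcur] at hx; exact absurd hx h2)

-- ===== VERDICT (by name: the statement is the Claim_ definition above) =====
theorem solve_spec : Claim_equal_solve := by
  intro L N _ hpre
  unfold Spec_solve solve solve_alt
  have := main_loop L (N - 0).toNat 0 N [] rfl
    (by intro i h1 h2
        exact ⟨h1, lt_of_lt_of_le h2 hpre⟩)
    (by intro m hm; simp [markersOf] at hm)
    (by intro h; simp [markersOf] at h)
  simpa [markersOf, gval, pmul] using this
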